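-- pv_equiv track=rewrite | github.com/Ashok-myunisoft/GBGTM | services/masterdata_service.py | _match_leave_name
-- ===== SOURCE A (Python) =====
-- def _lookup_alias_ids():
--
--     return {
--         "cl": ["casual", "casual leave"],
--         "casual": ["casual leave"],
--         "sl": ["sick", "sick leave"],
--         "sick": ["sick leave"],
--         "el": ["earned", "earned leave"],
--         "earned": ["earned leave"],
--         "pl": ["paid", "paid leave"],
--         "paid": ["paid leave"],
--         "lwp": ["leave without pay", "loss of pay", "lop"],
--         "lop": ["leave without pay", "loss of pay"],
--     }
--
-- def _normalize_leave_label(value: str):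
--
--     text = str(value or "").strip().lower()
--
--     replacements = {
--         "leave without pay": "lwp",
--         "loss of pay": "lwp",
--         "loss pay": "lwp",
--         "lop": "lwp",
--         "casual leave": "cl",
--         "sick leave": "sl",
--         "earned leave": "el",
--         "paid leave": "pl",
--     }
--
--     for source, target in replacements.items():
--         text = text.replace(source, target)
--
--     return " ".join(text.split())
--
-- def _match_leave_name(needle: str, row_name: str):
--
--     if not needle:
--         return True
--
--     needle = _normalize_leave_label(needle)
--     row_name = _normalize_leave_label(row_name)
--
--     if needle in row_name or row_name in needle:
--         return True
--
--     tokens = [token for token in needle.split() if token]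
--
--     if any(token in row_name for token in tokens):
--         return True
--
--     alias_map = _lookup_alias_ids()
--     aliases = alias_map.get(needle, [])
--
--     reverse_matches = []
--
--     for key, values in alias_map.items():
--         if needle == key or needle in values:
--             reverse_matches.append(key)
--             reverse_matches.extend(values)
--
--     return any(
--         alias in row_name
--         or row_name in alias
--         for alias in (aliases + reverse_matches)
--     )
-- ===== SOURCE B (Python) =====
-- def _normalize_leave_label(value: str):
--
--     text = str(value or "").strip().lower()
--
--     replacements = {
--         "leave without pay": "lwp",
--         "loss of pay": "lwp",
--         "loss pay": "lwp",
--         "lop": "lwp",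
--         "casual leave": "cl",
--         "sick leave": "sl",
--         "earned leave": "el",
--         "paid leave": "pl",
--     }
--
--     for source, target in replacements.items():
--         text = text.replace(source, target)
--
--     return " ".join(text.split())
--
-- # Alias phrases partitioned once into equivalence families: a needle that is any
-- # phrase of a family matches (bidirectionally) every phrase of that family.
-- # This replaces the key->values alias dict, its forward .get lookup and the
-- # reverse full scan of _match_leave_name in the original.
-- _ALIAS_FAMILIES = [
--     ("cl", "casual", "casual leave"),
--     ("sl", "sick", "sick leave"),
--     ("el", "earned", "earned leave"),
--     ("pl", "paid", "paid leave"),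
--     ("lwp", "lop", "leave without pay", "loss of pay"),
-- ]
--
-- def _match_leave_name(needle: str, row_name: str):
--
--     if not needle:
--         return True
--
--     needle = _normalize_leave_label(needle)
--     row_name = _normalize_leave_label(row_name)
--
--     if needle in row_name or row_name in needle:
--         return True
--
--     if any(token in row_name for token in needle.split()):
--         return True
--
--     for family in _ALIAS_FAMILIES:
--         if needle in family:
--             return any(a in row_name or row_name in a for a in family)
--
--     return False
-- ===== Notes on version B (the rewrite author's own statement) =====
-- stated objective: simpler
-- what changed: Replaces the key->values alias dictionary, its forward .get lookup and the reverse full scan that collects keys and values, with a precomputed partition of the alias phrases into five equivalence families: the needle's family is looked up once and matched bidirectionally against the row name.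
import Mathlib
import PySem

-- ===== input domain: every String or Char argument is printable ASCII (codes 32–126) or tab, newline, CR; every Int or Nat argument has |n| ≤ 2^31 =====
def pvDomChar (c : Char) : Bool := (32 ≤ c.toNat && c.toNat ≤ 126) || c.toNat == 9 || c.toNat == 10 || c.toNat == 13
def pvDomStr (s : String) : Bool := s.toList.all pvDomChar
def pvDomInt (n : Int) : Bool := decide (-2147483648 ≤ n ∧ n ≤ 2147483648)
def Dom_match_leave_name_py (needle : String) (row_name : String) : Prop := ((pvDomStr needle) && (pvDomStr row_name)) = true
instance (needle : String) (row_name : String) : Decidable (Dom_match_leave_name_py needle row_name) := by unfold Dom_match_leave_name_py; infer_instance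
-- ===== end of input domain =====

-- B replaces the key→values alias dict, its forward .get lookup and the reverse full
-- scan by a precomputed partition of the alias phrases into equivalence families,
-- looked up once (objective: simpler).

-- shared module helper _normalize_leave_label, used by both ports
def normalizeLeaveLabel (value : String) : String :=
  -- str(value or "") on a str argument is value itself ("" stays "")
  let text := PySem.Str.lower (PySem.Str.strip (if value == "" then "" else value))
  let replacements : List (String × String) :=
    [ ("leave without pay", "lwp"), ("loss of pay", "lwp"), ("loss pay", "lwp")
    , ("lop", "lwp"), ("casual leave", "cl"), ("sick leave", "sl")
    , ("earned leave", "el"), ("paid leave", "pl") ]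
  let text := replacements.foldl (fun t p => PySem.Str.replace t p.1 p.2) text
  PySem.Str.join " " (PySem.Str.split₀ text)

-- ===== PORT A =====
def aliasEntries : List (String × List String) :=
    [ ("cl", ["casual", "casual leave"])
    , ("casual", ["casual leave"])
    , ("sl", ["sick", "sick leave"])
    , ("sick", ["sick leave"])
    , ("el", ["earned", "earned leave"])
    , ("earned", ["earned leave"])
    , ("pl", ["paid", "paid leave"])
    , ("paid", ["paid leave"])
    , ("lwp", ["leave without pay", "loss of pay", "lop"])
    , ("lop", ["leave without pay", "loss of pay"]) ]

def lookupAliasIds : PySem.Dict String (List String) :=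
  PySem.Dict.ofList aliasEntries

def match_leave_name_py (needle : String) (row_name : String) : Bool :=
  if needle == "" then true
  else
    let needle := normalizeLeaveLabel needle
    let row_name := normalizeLeaveLabel row_name
    if PySem.Str.isIn needle row_name || PySem.Str.isIn row_name needle then true
    else
      let tokens := (PySem.Str.split₀ needle).filter (fun t => !(t == ""))
      if tokens.any (fun t => PySem.Str.isIn t row_name) then true
      else
        let aliasMap := lookupAliasIds
        let aliases := aliasMap.getD needle []
        let reverseMatches := aliasMap.items.foldl
          (fun acc kv => if needle == kv.1 || kv.2.contains needle then (acc ++ [kv.1]) ++ kv.2 else acc) []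
        (aliases ++ reverseMatches).any
          (fun a => PySem.Str.isIn a row_name || PySem.Str.isIn row_name a)

-- ===== PORT B =====
def aliasFamilies : List (List String) :=
  [ ["cl", "casual", "casual leave"]
  , ["sl", "sick", "sick leave"]
  , ["el", "earned", "earned leave"]
  , ["pl", "paid", "paid leave"]
  , ["lwp", "lop", "leave without pay", "loss of pay"] ]

def match_leave_name_py_alt (needle : String) (row_name : String) : Bool :=
  if needle == "" then true
  else
    let needle := normalizeLeaveLabel needle
    let row_name := normalizeLeaveLabel row_name
    if PySem.Str.isIn needle row_name || PySem.Str.isIn row_name needle then true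
    else if (PySem.Str.split₀ needle).any (fun t => PySem.Str.isIn t row_name) then true
    else
      -- for-loop with early return, as find?-then-any
      match aliasFamilies.find? (fun fam => fam.contains needle) with
      | some fam => fam.any (fun a => PySem.Str.isIn a row_name || PySem.Str.isIn row_name a)
      | none => false

-- ===== PRECONDITION & SPEC =====
def Spec_match_leave_name_py (needle : String) (row_name : String) (out : Bool) : Prop := out = match_leave_name_py_alt needle row_name
instance (needle : String) (row_name : String) (out : Bool) : Decidable (Spec_match_leave_name_py needle row_name out) := by unfold Spec_match_leave_name_py; infer_instance

-- ===== CLAIM (what is proved, stated in full; the proofs are below) =====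
def Claim_equal_match_leave_name_py : Prop := ∀ (needle : String) (row_name : String), Dom_match_leave_name_py needle row_name → Spec_match_leave_name_py needle row_name (match_leave_name_py needle row_name)

-- ===== LEMMAS AND PROOFS =====

-- words produced by str.split() are never empty
lemma split₀_go_ne_nil : ∀ (s cur : List Char) (acc : List (List Char)),
    (∀ t ∈ acc, t ≠ []) → ∀ t ∈ PySem.Chars.split₀.go s cur acc, t ≠ [] := by
  intro s
  induction s with
  | nil =>
    intro cur acc hacc t ht
    simp only [PySem.Chars.split₀.go] at ht
    split at ht
    · exact hacc t (List.mem_reverse.mp ht)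
    · rename_i hne
      rw [List.reverse_cons] at ht
      rcases List.mem_append.mp ht with h | h
      · exact hacc t (List.mem_reverse.mp h)
      · have ht' : t = cur.reverse := by simpa using h
        subst ht'
        simp only [List.isEmpty_iff] at hne
        simpa using hne
  | cons c rest ih =>
    intro cur acc hacc t ht
    simp only [PySem.Chars.split₀.go] at ht
    split at ht
    · split at ht
      · exact ih [] acc hacc t ht
      · refine ih [] (cur.reverse :: acc) ?_ t ht
        intro u hu
        rcases List.mem_cons.mp hu with h | h
        · subst h
          rename_i hne
          simp only [List.isEmpty_iff] at hne
          simpa using hne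
        · exact hacc u h
    · exact ih (c :: cur) acc hacc t ht

lemma split₀_ne_empty (s : String) : ∀ t ∈ PySem.Str.split₀ s, (t == "") = false := by
  intro t ht
  simp only [PySem.Str.split₀, List.mem_map] at ht
  obtain ⟨cs, hcs, rfl⟩ := ht
  have hne : cs ≠ [] := split₀_go_ne_nil s.toList [] [] (by simp) cs hcs
  simp only [beq_eq_false_iff_ne, ne_eq]
  intro h
  apply hne
  have h2 := congrArg String.toList h
  simpa using h2

-- A's reverse-scan foldl as filter + flatMap
lemma foldl_append_if_flatMap (p : String × List String → Bool)
    (l : List (String × List String)) (acc : List String) :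
    l.foldl (fun acc kv => if p kv then (acc ++ [kv.1]) ++ kv.2 else acc) acc
      = acc ++ (l.filter p).flatMap (fun kv => kv.1 :: kv.2) := by
  induction l generalizing acc with
  | nil => simp
  | cons kv rest ih =>
    simp only [List.foldl_cons, List.filter_cons]
    by_cases h : p kv = true
    · rw [if_pos h, if_pos h, ih]
      simp
    · rw [if_neg h, if_neg h, ih]

-- the core: A's aliases + reverse_matches test equals B's family lookup, any needle
lemma alias_tail_eq (n : String) (p : String → Bool) :
    (lookupAliasIds.getD n [] ++
      lookupAliasIds.items.foldl
        (fun acc kv => if n == kv.1 || kv.2.contains n then (acc ++ [kv.1]) ++ kv.2 else acc) []).any p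
    = match aliasFamilies.find? (fun fam => fam.contains n) with
      | some fam => fam.any p
      | none => false := by
  by_cases h0 : n = "cl"
  · subst h0
    show (["casual", "casual leave", "cl", "casual", "casual leave"] : List String).any p = (["cl", "casual", "casual leave"] : List String).any p
    cases hq0 : p "cl" <;> cases hq1 : p "casual" <;> cases hq2 : p "casual leave" <;> simp [hq0, hq1, hq2]
  by_cases h1 : n = "casual"
  · subst h1
    show (["casual leave", "cl", "casual", "casual leave", "casual", "casual leave"] : List String).any p = (["cl", "casual", "casual leave"] : List String).any p
    cases hq0 : p "cl" <;> cases hq1 : p "casual" <;> cases hq2 : p "casual leave" <;> simp [hq0, hq1, hq2]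
  by_cases h2 : n = "sl"
  · subst h2
    show (["sick", "sick leave", "sl", "sick", "sick leave"] : List String).any p = (["sl", "sick", "sick leave"] : List String).any p
    cases hq0 : p "sl" <;> cases hq1 : p "sick" <;> cases hq2 : p "sick leave" <;> simp [hq0, hq1, hq2]
  by_cases h3 : n = "sick"
  · subst h3
    show (["sick leave", "sl", "sick", "sick leave", "sick", "sick leave"] : List String).any p = (["sl", "sick", "sick leave"] : List String).any p
    cases hq0 : p "sl" <;> cases hq1 : p "sick" <;> cases hq2 : p "sick leave" <;> simp [hq0, hq1, hq2]
  by_cases h4 : n = "el"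
  · subst h4
    show (["earned", "earned leave", "el", "earned", "earned leave"] : List String).any p = (["el", "earned", "earned leave"] : List String).any p
    cases hq0 : p "el" <;> cases hq1 : p "earned" <;> cases hq2 : p "earned leave" <;> simp [hq0, hq1, hq2]
  by_cases h5 : n = "earned"
  · subst h5
    show (["earned leave", "el", "earned", "earned leave", "earned", "earned leave"] : List String).any p = (["el", "earned", "earned leave"] : List String).any p
    cases hq0 : p "el" <;> cases hq1 : p "earned" <;> cases hq2 : p "earned leave" <;> simp [hq0, hq1, hq2]
  by_cases h6 : n = "pl"
  · subst h6
    show (["paid", "paid leave", "pl", "paid", "paid leave"] : List String).any p = (["pl", "paid", "paid leave"] : List String).any p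
    cases hq0 : p "pl" <;> cases hq1 : p "paid" <;> cases hq2 : p "paid leave" <;> simp [hq0, hq1, hq2]
  by_cases h7 : n = "paid"
  · subst h7
    show (["paid leave", "pl", "paid", "paid leave", "paid", "paid leave"] : List String).any p = (["pl", "paid", "paid leave"] : List String).any p
    cases hq0 : p "pl" <;> cases hq1 : p "paid" <;> cases hq2 : p "paid leave" <;> simp [hq0, hq1, hq2]
  by_cases h8 : n = "lwp"
  · subst h8
    show (["leave without pay", "loss of pay", "lop", "lwp", "leave without pay", "loss of pay", "lop"] : List String).any p = (["lwp", "lop", "leave without pay", "loss of pay"] : List String).any p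
    cases hq0 : p "lwp" <;> cases hq1 : p "lop" <;> cases hq2 : p "leave without pay" <;> cases hq3 : p "loss of pay" <;> simp [hq0, hq1, hq2, hq3]
  by_cases h9 : n = "lop"
  · subst h9
    show (["leave without pay", "loss of pay", "lwp", "leave without pay", "loss of pay", "lop", "lop", "leave without pay", "loss of pay"] : List String).any p = (["lwp", "lop", "leave without pay", "loss of pay"] : List String).any p
    cases hq0 : p "lwp" <;> cases hq1 : p "lop" <;> cases hq2 : p "leave without pay" <;> cases hq3 : p "loss of pay" <;> simp [hq0, hq1, hq2, hq3]
  by_cases h10 : n = "casual leave"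
  · subst h10
    show (["cl", "casual", "casual leave", "casual", "casual leave"] : List String).any p = (["cl", "casual", "casual leave"] : List String).any p
    cases hq0 : p "cl" <;> cases hq1 : p "casual" <;> cases hq2 : p "casual leave" <;> simp [hq0, hq1, hq2]
  by_cases h11 : n = "sick leave"
  · subst h11
    show (["sl", "sick", "sick leave", "sick", "sick leave"] : List String).any p = (["sl", "sick", "sick leave"] : List String).any p
    cases hq0 : p "sl" <;> cases hq1 : p "sick" <;> cases hq2 : p "sick leave" <;> simp [hq0, hq1, hq2]
  by_cases h12 : n = "earned leave"
  · subst h12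
    show (["el", "earned", "earned leave", "earned", "earned leave"] : List String).any p = (["el", "earned", "earned leave"] : List String).any p
    cases hq0 : p "el" <;> cases hq1 : p "earned" <;> cases hq2 : p "earned leave" <;> simp [hq0, hq1, hq2]
  by_cases h13 : n = "paid leave"
  · subst h13
    show (["pl", "paid", "paid leave", "paid", "paid leave"] : List String).any p = (["pl", "paid", "paid leave"] : List String).any p
    cases hq0 : p "pl" <;> cases hq1 : p "paid" <;> cases hq2 : p "paid leave" <;> simp [hq0, hq1, hq2]
  by_cases h14 : n = "leave without pay"
  · subst h14
    show (["lwp", "leave without pay", "loss of pay", "lop", "lop", "leave without pay", "loss of pay"] : List String).any p = (["lwp", "lop", "leave without pay", "loss of pay"] : List String).any p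
    cases hq0 : p "lwp" <;> cases hq1 : p "lop" <;> cases hq2 : p "leave without pay" <;> cases hq3 : p "loss of pay" <;> simp [hq0, hq1, hq2, hq3]
  by_cases h15 : n = "loss of pay"
  · subst h15
    show (["lwp", "leave without pay", "loss of pay", "lop", "lop", "leave without pay", "loss of pay"] : List String).any p = (["lwp", "lop", "leave without pay", "loss of pay"] : List String).any p
    cases hq0 : p "lwp" <;> cases hq1 : p "lop" <;> cases hq2 : p "leave without pay" <;> cases hq3 : p "loss of pay" <;> simp [hq0, hq1, hq2, hq3]
  -- n matches no alias phrase: both sides are vacuous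
  have hitems : lookupAliasIds.items = aliasEntries := by rfl
  have hfind : List.find? (fun p => p.1 == n) aliasEntries = none := by
    rw [List.find?_eq_none]
    intro kv hkv
    simp only [aliasEntries, List.mem_cons, List.not_mem_nil, or_false] at hkv
    rcases hkv with rfl|rfl|rfl|rfl|rfl|rfl|rfl|rfl|rfl|rfl <;>
      (simp only [beq_iff_eq]; rintro rfl; exact absurd rfl (by assumption))
  have hg : lookupAliasIds.getD n [] = [] := by
    rw [PySem.Dict.getD, PySem.Dict.get?, hitems, hfind]
    rfl
  have hfil : aliasEntries.filter (fun kv => n == kv.1 || kv.2.contains n) = [] := by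
    rw [List.filter_eq_nil_iff]
    intro kv hkv
    simp only [aliasEntries, List.mem_cons, List.not_mem_nil, or_false] at hkv
    rcases hkv with rfl|rfl|rfl|rfl|rfl|rfl|rfl|rfl|rfl|rfl <;>
      simp [h0, h1, h2, h3, h4, h5, h6, h7, h8, h9, h10, h11, h12, h13, h14, h15]
  have hf : lookupAliasIds.items.foldl
      (fun acc kv => if n == kv.1 || kv.2.contains n then (acc ++ [kv.1]) ++ kv.2 else acc) [] = [] := by
    rw [hitems, foldl_append_if_flatMap, hfil]
    rfl
  have hb : aliasFamilies.find? (fun fam => fam.contains n) = none := by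
    rw [List.find?_eq_none]
    intro fam hfam
    simp only [aliasFamilies, List.mem_cons, List.not_mem_nil, or_false] at hfam
    rcases hfam with rfl|rfl|rfl|rfl|rfl <;>
      simp [h0, h1, h2, h3, h4, h5, h6, h7, h8, h9, h10, h11, h12, h13, h14, h15]
  rw [hg, hf, hb]
  rfl

-- ===== VERDICT (by name: the statement is the Claim_ definition above) =====
theorem match_leave_name_py_spec : Claim_equal_match_leave_name_py := by
  intro needle row_name _
  unfold Spec_match_leave_name_py match_leave_name_py match_leave_name_py_alt
  by_cases h0 : (needle == "") = true
  · rw [if_pos h0, if_pos h0]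
  · rw [if_neg h0, if_neg h0]
    dsimp only
    set n := normalizeLeaveLabel needle
    set r := normalizeLeaveLabel row_name
    have htok : (PySem.Str.split₀ n).filter (fun t => !(t == "")) = PySem.Str.split₀ n := by
      rw [List.filter_eq_self]
      intro t ht
      simp [split₀_ne_empty n t ht]
    rw [htok, alias_tail_eq n (fun a => PySem.Str.isIn a r || PySem.Str.isIn r a)]
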